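-- pv_equiv track=rewrite | github.com/Bor-12/AlgoritmosPython | Recorridos_Busquedas/Practica/operacion_fracaso.py | numero_admiradores
-- ===== SOURCE A (Python) =====
-- def numero_admiradores(nota, num_fans, lista_relacines_entre_fans):
--     grafo = {i: [] for i in range(num_fans)}
--
--     for a, b in lista_relacines_entre_fans:
--         grafo[a].append(b)
--         grafo[b].append(a)
--
--     if nota == 1:
--         return 1
--
--     visitados = [False] * num_fans
--     cola = [(0, 0)]  # (nodo, nivel)
--     visitados[0] = True
--     contador = 1
--
--     while cola:
--         actual, nivel = cola.pop(0)
--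
--         if nivel >= nota - 1:
--             continue
--
--         for vecino in grafo[actual]:
--             if not visitados[vecino]:
--                 visitados[vecino] = True
--                 contador += 1
--                 cola.append((vecino, nivel + 1))
--
--     return contador
-- ===== SOURCE B (Python) =====
-- def numero_admiradores(nota, num_fans, lista_relacines_entre_fans):
--     # Round-based fixpoint iteration directly over the edge list: no adjacency
--     # structure and no queue.  Each round scans every relation and marks the
--     # still-unreached endpoint of any relation whose other endpoint was already
--     # reached before this round (a snapshot keeps one round = one extra hop).
--     if nota == 1:
--         return 1
--
--     visitados = [False] * num_fans
--     visitados[0] = True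
--     contador = 1
--
--     ronda = 0
--     cambio = True
--     while cambio and ronda < nota - 1:
--         alcanzados = visitados[:]  # snapshot of the fans reached in earlier rounds
--         cambio = False
--         for a, b in lista_relacines_entre_fans:
--             if alcanzados[a] and not visitados[b]:
--                 visitados[b] = True
--                 contador += 1
--                 cambio = True
--             if alcanzados[b] and not visitados[a]:
--                 visitados[a] = True
--                 contador += 1
--                 cambio = True
--         ronda += 1
--     return contador
-- ===== Notes on version B (the rewrite author's own statement) =====
-- stated objective: alternative
-- what changed: Replaced the FIFO queue of (node, level) pairs over an adjacency dict by a round-based fixpoint iteration directly over the edge list: no graph is built and no queue kept; each round scans all relations and marks unreached endpoints adjacent to a snapshot of the already-reached set, stopping when a round changes nothing or nota-1 rounds are done.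
import Mathlib
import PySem

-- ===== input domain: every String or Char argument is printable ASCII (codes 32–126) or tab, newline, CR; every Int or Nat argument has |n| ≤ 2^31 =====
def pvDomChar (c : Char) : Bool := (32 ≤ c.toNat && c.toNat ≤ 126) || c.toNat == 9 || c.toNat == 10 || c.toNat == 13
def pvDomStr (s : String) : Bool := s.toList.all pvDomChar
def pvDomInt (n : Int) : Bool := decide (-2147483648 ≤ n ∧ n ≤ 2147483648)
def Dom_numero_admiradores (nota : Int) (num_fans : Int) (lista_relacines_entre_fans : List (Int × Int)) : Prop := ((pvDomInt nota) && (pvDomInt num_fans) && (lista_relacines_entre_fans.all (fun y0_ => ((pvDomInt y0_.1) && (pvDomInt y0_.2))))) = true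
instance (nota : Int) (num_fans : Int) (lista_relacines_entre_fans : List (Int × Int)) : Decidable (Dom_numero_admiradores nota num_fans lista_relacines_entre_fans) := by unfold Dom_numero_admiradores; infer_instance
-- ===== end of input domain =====

-- B replaces A's FIFO-queue BFS over an adjacency dict by a round-based fixpoint
-- iteration directly over the edge list (no graph built, no queue); equivalence of
-- the two is proved below.

-- ===== PORT A =====
-- grafo = {i: [] for i in range(num_fans)}; then grafo[a].append(b); grafo[b].append(a)
def buildGrafo (num_fans : Int) (edges : List (Int × Int)) : PySem.Dict Int (List Int) :=
  edges.foldl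
    (fun g p => (g.modify p.1 [] (· ++ [p.2])).modify p.2 [] (· ++ [p.1]))
    -- the comprehension's keys range(num_fans) are pairwise distinct, so the dict
    -- IS this pair list (equal to PySem.Dict.ofList of it, without its quadratic dedup)
    (PySem.Dict.mk ((PySem.List.pyRange 0 num_fans 1).map (fun i => (i, ([] : List Int)))))

-- 'if not visitados[vecino]: visitados[vecino] = True' — some vis' iff Python takes the
-- branch (on an out-of-range index Python raises IndexError — excluded by Pre_ — and
-- this returns none).  Shared by both ports: B's 'not visitados[a]' check is the same code.
def markVis (vis : List Bool) (i : Int) : Option (List Bool) :=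
  match PySem.List.pyGet? vis i with
  | some false => PySem.List.pySet? vis i true
  | _ => none

-- the body of A's 'for vecino in grafo[actual]' loop: state (visitados, cola, contador)
def visitaVecinos (ns : List Int) (vis : List Bool) (cola : List (Int × Int)) (cnt : Int)
    (nivel : Int) : List Bool × List (Int × Int) × Int :=
  ns.foldl
    (fun s vecino =>
      match markVis s.1 vecino with
      | some v' => (v', s.2.1 ++ [(vecino, nivel + 1)], s.2.2 + 1)
      | none => s)
    (vis, cola, cnt)

-- A's while loop over cola. The loop is written structurally on an explicit
-- iteration bound ('fuel'); the bound passed by bfsA is large enough that the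
-- 0-branch is never reached (totality guard only; proved in bfsAGo_irrel below).
def bfsAGo (nota : Int) (g : PySem.Dict Int (List Int)) (fuel : Nat)
    (cola : List (Int × Int)) (vis : List Bool) (cnt : Int) : Int :=
  match fuel, cola with
  | _, [] => cnt
  | 0, _ => cnt
  | fuel + 1, (actual, nivel) :: rest =>
    if nivel ≥ nota - 1 then bfsAGo nota g fuel rest vis cnt
    else
      let s := visitaVecinos (g.getD actual []) vis rest cnt nivel
      bfsAGo nota g fuel s.2.1 s.1 s.2.2

def bfsA (nota : Int) (g : PySem.Dict Int (List Int)) (cola : List (Int × Int))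
    (vis : List Bool) (cnt : Int) : Int :=
  bfsAGo nota g (2 * vis.count false + cola.length + 1) cola vis cnt

def numero_admiradores (nota : Int) (num_fans : Int)
    (lista_relacines_entre_fans : List (Int × Int)) : Int :=
  let grafo := buildGrafo num_fans lista_relacines_entre_fans
  if nota = 1 then 1
  else
    -- visitados = [False]*num_fans; visitados[0] = True  (IndexError if num_fans ≤ 0: see Pre_)
    let visitados := PySem.List.pySetD (List.replicate num_fans.toNat false) 0 true
    bfsA nota grafo [(0, 0)] visitados 1

-- ===== PORT B =====
-- 'if alcanzados[src] and not visitados[dst]: visitados[dst] = True; contador += 1;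
--  cambio = True' — one conditional mark; state (visitados, contador, cambio)
def pasoArista (snap : List Bool) (src dst : Int) (st : List Bool × Int × Bool) :
    List Bool × Int × Bool :=
  match PySem.List.pyGet? snap src with
  | some true =>
    match markVis st.1 dst with
    | some v' => (v', st.2.1 + 1, true)
    | none => st
  | _ => st

-- Source B's 'for a, b in lista_relacines_entre_fans' pass (both directions per edge)
def edgeScan (E : List (Int × Int)) (snap : List Bool) (st : List Bool × Int × Bool) :
    List Bool × Int × Bool :=
  E.foldl (fun t p => pasoArista snap p.2 p.1 (pasoArista snap p.1 p.2 t)) st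

-- Source B's 'while cambio and ronda < nota - 1' loop, structurally on the number of
-- remaining rounds; each round snapshots visitados and rescans the edge list
def scanRounds (E : List (Int × Int)) : Nat → List Bool → Int → Int
  | 0, _, cnt => cnt
  | k + 1, vis, cnt =>
    let s := edgeScan E vis (vis, cnt, false)
    if s.2.2 then scanRounds E k s.1 s.2.1 else s.2.1

def numero_admiradores_alt (nota : Int) (num_fans : Int)
    (lista_relacines_entre_fans : List (Int × Int)) : Int :=
  if nota = 1 then 1
  else
    -- visitados = [False]*num_fans; visitados[0] = True
    scanRounds lista_relacines_entre_fans (nota - 1).toNat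
      (PySem.List.pySetD (List.replicate num_fans.toNat false) 0 true) 1

-- ===== PRECONDITION & SPEC =====
-- Pre_ excludes exactly the inputs where the Python A raises: an edge endpoint outside
-- range(num_fans) (KeyError in the graph build), and num_fans < 1 with nota ≠ 1
-- (IndexError at visitados[0]).
def Pre_numero_admiradores (nota : Int) (num_fans : Int)
    (lista_relacines_entre_fans : List (Int × Int)) : Prop :=
  (∀ p ∈ lista_relacines_entre_fans,
      0 ≤ p.1 ∧ p.1 < num_fans ∧ 0 ≤ p.2 ∧ p.2 < num_fans) ∧
  (nota = 1 ∨ 1 ≤ num_fans)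
instance (nota : Int) (num_fans : Int) (lista_relacines_entre_fans : List (Int × Int)) : Decidable (Pre_numero_admiradores nota num_fans lista_relacines_entre_fans) := by unfold Pre_numero_admiradores; infer_instance

def pvWitness_numero_admiradores : Int × Int × (List (Int × Int)) := (2, 3, [(0, 1), (1, 2)])

def Spec_numero_admiradores (nota : Int) (num_fans : Int) (lista_relacines_entre_fans : List (Int × Int)) (out : Int) : Prop := out = numero_admiradores_alt nota num_fans lista_relacines_entre_fans
instance (nota : Int) (num_fans : Int) (lista_relacines_entre_fans : List (Int × Int)) (out : Int) : Decidable (Spec_numero_admiradores nota num_fans lista_relacines_entre_fans out) := by unfold Spec_numero_admiradores; infer_instance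

-- ===== CLAIM (what is proved, stated in full; the proofs are below) =====
def Claim_equal_numero_admiradores : Prop := ∀ (nota : Int) (num_fans : Int) (lista_relacines_entre_fans : List (Int × Int)), Dom_numero_admiradores nota num_fans lista_relacines_entre_fans → Pre_numero_admiradores nota num_fans lista_relacines_entre_fans → Spec_numero_admiradores nota num_fans lista_relacines_entre_fans (numero_admiradores nota num_fans lista_relacines_entre_fans)

-- ===== LEMMAS AND PROOFS =====

-- ---- proof-side frontier BFS: an intermediate between A's queue and B's edge rounds ----
-- state (siguiente, visitados, contador); one frontier node's neighbours
def innerPaso (ns : List Int) (s : List Int × List Bool × Int) : List Int × List Bool × Int :=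
  ns.foldl
    (fun t vecino =>
      match markVis t.2.1 vecino with
      | some v' => (t.1 ++ [vecino], v', t.2.2 + 1)
      | none => t)
    s

-- one whole BFS level
def nivelPaso (g : PySem.Dict Int (List Int)) (frontera : List Int)
    (s : List Int × List Bool × Int) : List Int × List Bool × Int :=
  frontera.foldl (fun t nodo => innerPaso (g.getD nodo []) t) s

-- level-synchronous BFS, one recursion step per level
def frontRounds (g : PySem.Dict Int (List Int)) : Nat → List Int → List Bool → Int → Int
  | _, [], _, cnt => cnt
  | 0, _, _, cnt => cnt
  | k + 1, F, vis, cnt =>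
    let s := nivelPaso g F ([], vis, cnt)
    frontRounds g k s.1 s.2.1 s.2.2

-- ---- basic markVis facts ----
theorem pyIdx_nonneg (len : Nat) (i : Int) (h0 : 0 ≤ i) (h1 : i < (len : Int)) :
    PySem.List.pyIdx? len i = some i.toNat := by
  unfold PySem.List.pyIdx?
  split_ifs <;> first | rfl | omega

theorem markVis_some (vis : List Bool) (i : Int) (v' : List Bool)
    (h : markVis vis i = some v') :
    ∃ k, k < vis.length ∧ vis[k]? = some false ∧ v' = vis.set k true := by
  unfold markVis at h
  rcases hg : PySem.List.pyGet? vis i with _ | b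
  · simp [hg] at h
  · rcases b with _ | _
    · simp only [hg] at h
      rcases hi : PySem.List.pyIdx? vis.length i with _ | k
      · simp [PySem.List.pySet?, hi] at h
      · have hk : k < vis.length := by
          unfold PySem.List.pyIdx? at hi
          split_ifs at hi with h1 h2 h3
          · injection hi with hk'; omega
          · injection hi with hk'; omega
        have hget : vis[k]? = some false := by
          simpa [PySem.List.pyGet?, hi] using hg
        have hv' : v' = vis.set k true := by
          have h' := h
          simp [PySem.List.pySet?, hi] at h'
          exact h'.symm
        exact ⟨k, hk, hget, hv'⟩
    · simp [hg] at h

theorem markVis_eq_false (vis : List Bool) (i : Int) (h0 : 0 ≤ i)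
    (h1 : i < (vis.length : Int)) (hf : vis[i.toNat]? = some false) :
    markVis vis i = some (vis.set i.toNat true) := by
  unfold markVis
  have hi : PySem.List.pyIdx? vis.length i = some i.toNat := pyIdx_nonneg _ _ h0 h1
  have hg : PySem.List.pyGet? vis i = some false := by
    simp [PySem.List.pyGet?, hi, hf]
  rw [hg]
  simp [PySem.List.pySet?, hi]

theorem markVis_eq_true (vis : List Bool) (i : Int) (h0 : 0 ≤ i)
    (h1 : i < (vis.length : Int)) (ht : vis[i.toNat]? = some true) :
    markVis vis i = none := by
  unfold markVis
  have hi : PySem.List.pyIdx? vis.length i = some i.toNat := pyIdx_nonneg _ _ h0 h1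
  have hg : PySem.List.pyGet? vis i = some true := by
    simp [PySem.List.pyGet?, hi, ht]
  rw [hg]

theorem countFalse_set_true (vis : List Bool) (k : Nat) (hk : vis[k]? = some false) :
    (vis.set k true).count false + 1 = vis.count false := by
  induction vis generalizing k with
  | nil => simp at hk
  | cons a l ihl =>
    cases k with
    | zero =>
      simp only [List.getElem?_cons_zero, Option.some.injEq] at hk
      subst hk
      simp
    | succ k' =>
      have hk' : l[k']? = some false := by simpa using hk
      have := ihl k' hk'
      simp only [List.set_cons_succ, List.count_cons]
      omega

-- ---- old A-side lemmas: queue BFS = frontier BFS ----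
theorem visitaVecinos_measure (ns : List Int) (vis : List Bool) (cola : List (Int × Int))
    (cnt : Int) (nivel : Int) :
    2 * (visitaVecinos ns vis cola cnt nivel).1.count false
      + (visitaVecinos ns vis cola cnt nivel).2.1.length
    ≤ 2 * vis.count false + cola.length := by
  induction ns generalizing vis cola cnt with
  | nil => simp [visitaVecinos]
  | cons x xs ih =>
    simp only [visitaVecinos, List.foldl] at *
    rcases h : markVis vis x with _ | v'
    · exact ih vis cola cnt
    · obtain ⟨k, hk, hkf, hv'⟩ := markVis_some vis x v' h
      have hc : v'.count false + 1 = vis.count false := by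
        rw [hv']; exact countFalse_set_true vis k hkf
      have := ih v' (cola ++ [(x, nivel + 1)]) (cnt + 1)
      simp only [List.length_append, List.length_cons, List.length_nil] at this ⊢
      omega

theorem bfsAGo_cons (nota : Int) (g : PySem.Dict Int (List Int)) (fuel : Nat)
    (actual nivel : Int) (rest : List (Int × Int)) (vis : List Bool) (cnt : Int) :
    bfsAGo nota g (fuel + 1) ((actual, nivel) :: rest) vis cnt
      = if nivel ≥ nota - 1 then bfsAGo nota g fuel rest vis cnt
        else
          bfsAGo nota g fuel
            (visitaVecinos (g.getD actual []) vis rest cnt nivel).2.1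
            (visitaVecinos (g.getD actual []) vis rest cnt nivel).1
            (visitaVecinos (g.getD actual []) vis rest cnt nivel).2.2 := rfl

theorem bfsAGo_irrel (nota : Int) (g : PySem.Dict Int (List Int)) :
    ∀ (f1 f2 : Nat) (cola : List (Int × Int)) (vis : List Bool) (cnt : Int),
      2 * vis.count false + cola.length < f1 →
      2 * vis.count false + cola.length < f2 →
      bfsAGo nota g f1 cola vis cnt = bfsAGo nota g f2 cola vis cnt := by
  intro f1
  induction f1 with
  | zero => intro f2 cola vis cnt h1; omega
  | succ n ih =>
    intro f2 cola vis cnt h1 h2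
    match cola with
    | [] => cases f2 <;> rfl
    | (actual, nivel) :: rest =>
      match f2, h2 with
      | m + 1, h2 =>
        rw [bfsAGo_cons, bfsAGo_cons]
        simp only [List.length_cons] at h1 h2
        by_cases hn : nivel ≥ nota - 1
        · rw [if_pos hn, if_pos hn]
          exact ih m rest vis cnt (by omega) (by omega)
        · rw [if_neg hn, if_neg hn]
          have hm := visitaVecinos_measure (g.getD actual []) vis rest cnt nivel
          exact ih m _ _ _ (by omega) (by omega)

theorem bfsA_cons_ge (nota : Int) (g : PySem.Dict Int (List Int)) (actual nivel : Int)
    (rest : List (Int × Int)) (vis : List Bool) (cnt : Int) (h : nivel ≥ nota - 1) :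
    bfsA nota g ((actual, nivel) :: rest) vis cnt = bfsA nota g rest vis cnt := by
  unfold bfsA
  have h2 : 2 * vis.count false + ((actual, nivel) :: rest).length + 1
      = (2 * vis.count false + rest.length + 1) + 1 := by
    simp only [List.length_cons]; omega
  rw [h2, bfsAGo_cons, if_pos h]

theorem bfsA_cons_lt (nota : Int) (g : PySem.Dict Int (List Int)) (actual nivel : Int)
    (rest : List (Int × Int)) (vis : List Bool) (cnt : Int) (h : ¬ nivel ≥ nota - 1) :
    bfsA nota g ((actual, nivel) :: rest) vis cnt
      = bfsA nota g (visitaVecinos (g.getD actual []) vis rest cnt nivel).2.1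
          (visitaVecinos (g.getD actual []) vis rest cnt nivel).1
          (visitaVecinos (g.getD actual []) vis rest cnt nivel).2.2 := by
  unfold bfsA
  have h2 : 2 * vis.count false + ((actual, nivel) :: rest).length + 1
      = (2 * vis.count false + rest.length + 1) + 1 := by
    simp only [List.length_cons]; omega
  rw [h2, bfsAGo_cons, if_neg h]
  have hm := visitaVecinos_measure (g.getD actual []) vis rest cnt nivel
  exact bfsAGo_irrel nota g _ _ _ _ _ (by omega) (by omega)

theorem innerPaso_shift (ns : List Int) (nxt : List Int) (vis : List Bool) (cnt : Int) :
    innerPaso ns (nxt, vis, cnt)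
      = (nxt ++ (innerPaso ns ([], vis, cnt)).1,
         (innerPaso ns ([], vis, cnt)).2.1, (innerPaso ns ([], vis, cnt)).2.2) := by
  induction ns generalizing nxt vis cnt with
  | nil => simp [innerPaso]
  | cons x xs ih =>
    simp only [innerPaso, List.foldl] at *
    rcases h : markVis vis x with _ | v'
    · exact ih nxt vis cnt
    · simp only [List.nil_append]
      rw [ih [x] v' (cnt + 1), ih (nxt ++ [x]) v' (cnt + 1)]
      simp

theorem visitaVecinos_eq (ns : List Int) (vis : List Bool) (cola : List (Int × Int))
    (cnt : Int) (nivel : Int) :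
    visitaVecinos ns vis cola cnt nivel
      = ((innerPaso ns ([], vis, cnt)).2.1,
         cola ++ (innerPaso ns ([], vis, cnt)).1.map (fun v => (v, nivel + 1)),
         (innerPaso ns ([], vis, cnt)).2.2) := by
  induction ns generalizing vis cola cnt with
  | nil => simp [visitaVecinos, innerPaso]
  | cons x xs ih =>
    simp only [visitaVecinos, innerPaso, List.foldl] at *
    rcases h : markVis vis x with _ | v'
    · exact ih vis cola cnt
    · simp only [List.nil_append]
      rw [ih v' (cola ++ [(x, nivel + 1)]) (cnt + 1)]
      have hs := innerPaso_shift xs [x] v' (cnt + 1)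
      simp only [innerPaso] at hs
      rw [hs]
      simp

theorem nivelPaso_shift (g : PySem.Dict Int (List Int)) (F : List Int) (nxt : List Int)
    (vis : List Bool) (cnt : Int) :
    nivelPaso g F (nxt, vis, cnt)
      = (nxt ++ (nivelPaso g F ([], vis, cnt)).1,
         (nivelPaso g F ([], vis, cnt)).2.1, (nivelPaso g F ([], vis, cnt)).2.2) := by
  induction F generalizing nxt vis cnt with
  | nil => simp [nivelPaso]
  | cons x F ih =>
    simp only [nivelPaso, List.foldl] at *
    rw [innerPaso_shift (g.getD x []) nxt vis cnt]
    rcases h : innerPaso (g.getD x []) ([], vis, cnt) with ⟨N, V, C⟩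
    rw [ih (nxt ++ N) V C, ih N V C]
    simp

theorem bfsA_level (nota : Int) (g : PySem.Dict Int (List Int)) (l : Int) (hl : l < nota - 1)
    (F1 F2 : List Int) (vis : List Bool) (cnt : Int) :
    bfsA nota g (F1.map (fun v => (v, l)) ++ F2.map (fun v => (v, l + 1))) vis cnt
      = bfsA nota g
          ((F2 ++ (nivelPaso g F1 ([], vis, cnt)).1).map (fun v => (v, l + 1)))
          (nivelPaso g F1 ([], vis, cnt)).2.1 (nivelPaso g F1 ([], vis, cnt)).2.2 := by
  induction F1 generalizing F2 vis cnt with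
  | nil => simp [nivelPaso]
  | cons x F1 ih =>
    rw [List.map_cons, List.cons_append, bfsA_cons_lt _ _ _ _ _ _ _ (by omega)]
    have hv := visitaVecinos_eq (g.getD x [])
      vis (F1.map (fun v => (v, l)) ++ F2.map (fun v => (v, l + 1))) cnt l
    simp only [hv]
    rcases h : innerPaso (g.getD x []) ([], vis, cnt) with ⟨N, V, C⟩
    simp only
    have harr : F1.map (fun v => (v, l)) ++ F2.map (fun v => (v, l + 1))
        ++ N.map (fun v => (v, l + 1))
        = F1.map (fun v => (v, l)) ++ (F2 ++ N).map (fun v => (v, l + 1)) := by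
      simp
    rw [harr, ih (F2 ++ N) V C]
    have hn : nivelPaso g (x :: F1) ([], vis, cnt) = nivelPaso g F1 (N, V, C) := by
      simp [nivelPaso, h]
    rw [hn, nivelPaso_shift g F1 N V C]
    simp

theorem bfsA_drain (nota : Int) (g : PySem.Dict Int (List Int)) (l : Int)
    (hl : nota - 1 ≤ l) (F : List Int) (vis : List Bool) (cnt : Int) :
    bfsA nota g (F.map (fun v => (v, l))) vis cnt = cnt := by
  induction F with
  | nil => simp [bfsA, bfsAGo]
  | cons x F ih =>
    rw [List.map_cons, bfsA_cons_ge _ _ _ _ _ _ _ (by omega)]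
    exact ih

theorem bfsAB' (nota : Int) (g : PySem.Dict Int (List Int)) :
    ∀ (k : Nat) (l : Int) (F : List Int) (vis : List Bool) (cnt : Int),
      k = (nota - 1 - l).toNat →
      bfsA nota g (F.map (fun v => (v, l))) vis cnt = frontRounds g k F vis cnt := by
  intro k
  induction k with
  | zero =>
    intro l F vis cnt hk
    rw [bfsA_drain nota g l (by omega) F vis cnt]
    match F with
    | [] => rfl
    | _ :: _ => rfl
  | succ k ih =>
    intro l F vis cnt hk
    match F with
    | [] => simp [bfsA, bfsAGo, frontRounds]
    | x :: F' =>
      have hl : l < nota - 1 := by omega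
      have := bfsA_level nota g l hl (x :: F') [] vis cnt
      simp only [List.map_nil, List.append_nil, List.nil_append] at this
      rw [this]
      rw [show frontRounds g (k + 1) (x :: F') vis cnt
            = frontRounds g k (nivelPaso g (x :: F') ([], vis, cnt)).1
                (nivelPaso g (x :: F') ([], vis, cnt)).2.1
                (nivelPaso g (x :: F') ([], vis, cnt)).2.2 from rfl]
      exact ih (l + 1) _ _ _ (by omega)

-- ---- adjacency characterization of buildGrafo ----
theorem getD_init (l : List Int) (x : Int) :
    (PySem.Dict.mk (l.map (fun i => (i, ([] : List Int))))).getD x [] = [] := by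
  induction l with
  | nil => rfl
  | cons a l ih =>
    simp only [List.map_cons, PySem.Dict.getD, PySem.Dict.get?, List.find?]
    by_cases h : a = x
    · simp [h]
    · simp only [PySem.Dict.getD, PySem.Dict.get?] at ih
      simpa [show (a == x) = false by simp [h]] using ih

theorem mem_buildGrafo (n : Int) (E : List (Int × Int)) (x v : Int) :
    v ∈ (buildGrafo n E).getD x [] ↔ ∃ p ∈ E, p = (x, v) ∨ p = (v, x) := by
  have main : ∀ (E : List (Int × Int)) (g : PySem.Dict Int (List Int)) (x v : Int),
      v ∈ (E.foldl (fun g p => (g.modify p.1 [] (· ++ [p.2])).modify p.2 [] (· ++ [p.1])) g).getD x []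
        ↔ v ∈ g.getD x [] ∨ ∃ p ∈ E, p = (x, v) ∨ p = (v, x) := by
    intro E
    induction E with
    | nil => simp
    | cons p rest ih =>
      intro g x v
      rcases p with ⟨a, b⟩
      simp only [List.foldl_cons]
      rw [ih]
      have hstep : v ∈ ((g.modify a [] (· ++ [b])).modify b [] (· ++ [a])).getD x []
          ↔ v ∈ g.getD x [] ∨ (x = a ∧ v = b) ∨ (x = b ∧ v = a) := by
        simp only [PySem.Dict.modify, PySem.Dict.getD_insert]
        split_ifs <;> subst_vars <;> simp_all [List.mem_append] <;> tauto
      rw [hstep]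
      constructor
      · rintro ((h | h) | h)
        · exact Or.inl h
        · rcases h with ⟨hxa, hvb⟩ | ⟨hxb, hva⟩
          · exact Or.inr ⟨(a, b), List.mem_cons_self .., by subst hxa; subst hvb; simp⟩
          · exact Or.inr ⟨(a, b), List.mem_cons_self .., by subst hxb; subst hva; simp⟩
        · rcases h with ⟨p, hp, hor⟩
          exact Or.inr ⟨p, List.mem_cons_of_mem _ hp, hor⟩
      · rintro (h | ⟨p, hp, hor⟩)
        · exact Or.inl (Or.inl h)
        · rcases List.mem_cons.mp hp with rfl | hp'
          · rcases hor with h | h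
            · exact Or.inl (Or.inr (Or.inl ⟨by injection h.symm, by injection h.symm⟩))
            · exact Or.inl (Or.inr (Or.inr ⟨by injection h.symm, by injection h.symm⟩))
          · exact Or.inr ⟨p, hp', hor⟩
  rw [show buildGrafo n E = E.foldl (fun g p => (g.modify p.1 [] (· ++ [p.2])).modify p.2 [] (· ++ [p.1])) (PySem.Dict.mk ((PySem.List.pyRange 0 n 1).map (fun i => (i, ([] : List Int))))) from rfl]
  rw [main]
  rw [getD_init]
  simp

-- ---- the per-round condition each side marks by ----
def condFB (g : PySem.Dict Int (List Int)) (F : List Int) (j : Nat) : Bool :=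
  F.any (fun x => (g.getD x []).any (fun v => v == ((j : Nat) : Int)))

def condEB (E : List (Int × Int)) (snap : List Bool) (j : Nat) : Bool :=
  E.any (fun p =>
    (PySem.List.pyGet? snap p.1 == some true && p.2 == ((j : Nat) : Int))
      || (PySem.List.pyGet? snap p.2 == some true && p.1 == ((j : Nat) : Int)))

theorem map_or_comp (o : Option Bool) (c₁ c₂ : Bool) :
    (o.map (fun b => b || c₁)).map (fun b => b || c₂) = o.map (fun b => b || (c₁ || c₂)) := by
  cases o <;> simp [Bool.or_assoc]

-- ---- characterization of one frontier level (proof-side BFS) ----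
theorem innerPaso_char (ns : List Int) (N : List Int) (vis : List Bool) (cnt : Int)
    (hns : ∀ v ∈ ns, 0 ≤ v ∧ v < (vis.length : Int)) :
    (innerPaso ns (N, vis, cnt)).2.1.length = vis.length
    ∧ (∀ j : Nat, (innerPaso ns (N, vis, cnt)).2.1[j]?
        = vis[j]?.map (fun b => b || ns.any (fun v => v == ((j : Nat) : Int))))
    ∧ ((innerPaso ns (N, vis, cnt)).2.2 + ((innerPaso ns (N, vis, cnt)).2.1.count false : Int)
        = cnt + (vis.count false : Int))
    ∧ (((innerPaso ns (N, vis, cnt)).1.length : Int)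
          + ((innerPaso ns (N, vis, cnt)).2.1.count false : Int)
        = (N.length : Int) + (vis.count false : Int))
    ∧ (∀ v, v ∈ (innerPaso ns (N, vis, cnt)).1 → v ∈ N ∨ v ∈ ns)
    ∧ (∀ j : Nat, vis[j]? = some false → (innerPaso ns (N, vis, cnt)).2.1[j]? = some true
        → ((j : Nat) : Int) ∈ (innerPaso ns (N, vis, cnt)).1) := by
  induction ns generalizing N vis cnt with
  | nil =>
    refine ⟨by simp [innerPaso], ?_, by simp [innerPaso], by simp [innerPaso],
      by simp [innerPaso], ?_⟩
    · intro j
      simp only [innerPaso, List.foldl_nil]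
      cases vis[j]? <;> simp
    intro j h1 h2
    simp only [innerPaso, List.foldl_nil] at h2
    rw [h1] at h2
    exact absurd h2 (by simp)
  | cons v rest ih =>
    obtain ⟨hv0, hv1⟩ := hns v (List.mem_cons_self ..)
    have hvlt : v.toNat < vis.length := by omega
    have hvv : ((v.toNat : Nat) : Int) = v := Int.toNat_of_nonneg hv0
    have hrest : ∀ u ∈ rest, 0 ≤ u ∧ u < (vis.length : Int) :=
      fun u hu => hns u (List.mem_cons_of_mem _ hu)
    rcases hb : vis[v.toNat]? with _ | b
    · exact absurd hb (by simp [List.getElem?_eq_getElem hvlt])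
    rcases b with _ | _
    · -- vis[v] = false : this neighbour is marked
      have hm : markVis vis v = some (vis.set v.toNat true) := markVis_eq_false _ _ hv0 hv1 hb
      have hstep : innerPaso (v :: rest) (N, vis, cnt)
          = innerPaso rest (N ++ [v], vis.set v.toNat true, cnt + 1) := by
        simp [innerPaso, hm]
      have len1 : (vis.set v.toNat true).length = vis.length := List.length_set ..
      have hrest1 : ∀ u ∈ rest, 0 ≤ u ∧ u < ((vis.set v.toNat true).length : Int) := by
        rw [len1]; exact hrest
      obtain ⟨L, C, K1, K2, M1, M2⟩ := ih (N ++ [v]) (vis.set v.toNat true) (cnt + 1) hrest1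
      have hcnt := countFalse_set_true vis v.toNat hb
      rw [hstep]
      refine ⟨L.trans len1, ?_, by omega, ?_, ?_, ?_⟩
      · intro j
        rw [C j]
        by_cases hj : j = v.toNat
        · subst hj
          rw [List.getElem?_set, if_pos rfl, if_pos hvlt, hb]
          simp [hvv]
        · have hne : (v == ((j : Nat) : Int)) = false := by
            simp only [beq_eq_false_iff_ne, ne_eq]
            intro hEq; exact hj (by omega)
          rw [List.getElem?_set, if_neg (by omega)]
          cases vis[j]? <;> simp [List.any_cons, hne]
      · have : (N ++ [v]).length = N.length + 1 := by simp
        omega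
      · intro u hu
        rcases M1 u hu with h | h
        · rcases List.mem_append.mp h with h' | h'
          · exact Or.inl h'
          · have hu : u = v := by simpa using h'
            subst hu
            exact Or.inr (List.mem_cons_self ..)
        · exact Or.inr (List.mem_cons_of_mem _ h)
      · intro j hjf hjt
        by_cases hj : j = v.toNat
        · subst hj
          have hpre := innerPaso_shift rest (N ++ [v]) (vis.set v.toNat true) (cnt + 1)
          rw [hpre]
          simp [hvv]
        · have h1 : (vis.set v.toNat true)[j]? = some false := by
            rw [List.getElem?_set, if_neg (by omega)]; exact hjf
          exact M2 j h1 hjt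
    · -- vis[v] = true : skipped
      have hm : markVis vis v = none := markVis_eq_true _ _ hv0 hv1 hb
      have hstep : innerPaso (v :: rest) (N, vis, cnt) = innerPaso rest (N, vis, cnt) := by
        simp [innerPaso, hm]
      obtain ⟨L, C, K1, K2, M1, M2⟩ := ih N vis cnt hrest
      rw [hstep]
      refine ⟨L, ?_, K1, K2, ?_, ?_⟩
      · intro j
        rw [C j]
        by_cases hj : j = v.toNat
        · subst hj
          rw [hb]
          simp [hvv]
        · have hne : (v == ((j : Nat) : Int)) = false := by
            simp only [beq_eq_false_iff_ne, ne_eq]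
            intro hEq; exact hj (by omega)
          cases vis[j]? <;> simp [List.any_cons, hne]
      · intro u hu
        rcases M1 u hu with h | h
        · exact Or.inl h
        · exact Or.inr (List.mem_cons_of_mem _ h)
      · intro j hjf hjt
        by_cases hj : j = v.toNat
        · subst hj
          rw [hb] at hjf
          exact absurd hjf (by simp)
        · exact M2 j hjf hjt

theorem nivelPaso_char (g : PySem.Dict Int (List Int)) (F : List Int) (N : List Int)
    (vis : List Bool) (cnt : Int)
    (hadj : ∀ x v, v ∈ g.getD x [] → 0 ≤ v ∧ v < (vis.length : Int)) :
    (nivelPaso g F (N, vis, cnt)).2.1.length = vis.length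
    ∧ (∀ j : Nat, (nivelPaso g F (N, vis, cnt)).2.1[j]?
        = vis[j]?.map (fun b => b || condFB g F j))
    ∧ ((nivelPaso g F (N, vis, cnt)).2.2 + ((nivelPaso g F (N, vis, cnt)).2.1.count false : Int)
        = cnt + (vis.count false : Int))
    ∧ (((nivelPaso g F (N, vis, cnt)).1.length : Int)
          + ((nivelPaso g F (N, vis, cnt)).2.1.count false : Int)
        = (N.length : Int) + (vis.count false : Int))
    ∧ (∀ v, v ∈ (nivelPaso g F (N, vis, cnt)).1 → v ∈ N ∨ ∃ x ∈ F, v ∈ g.getD x [])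
    ∧ (∀ j : Nat, vis[j]? = some false → (nivelPaso g F (N, vis, cnt)).2.1[j]? = some true
        → ((j : Nat) : Int) ∈ (nivelPaso g F (N, vis, cnt)).1) := by
  induction F generalizing N vis cnt with
  | nil =>
    refine ⟨by simp [nivelPaso], ?_, by simp [nivelPaso], by simp [nivelPaso], ?_, ?_⟩
    · intro j
      simp only [nivelPaso, List.foldl_nil]
      cases vis[j]? <;> simp [condFB]
    · intro u hu
      simp only [nivelPaso, List.foldl_nil] at hu
      exact Or.inl hu
    · intro j h1 h2
      simp only [nivelPaso, List.foldl_nil] at h2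
      rw [h1] at h2
      exact absurd h2 (by simp)
  | cons x F ih =>
    have hstep : nivelPaso g (x :: F) (N, vis, cnt)
        = nivelPaso g F (innerPaso (g.getD x []) (N, vis, cnt)) := rfl
    obtain ⟨L1, C1, K11, K12, M11, M12⟩ :=
      innerPaso_char (g.getD x []) N vis cnt (fun v hv => hadj x v hv)
    rcases hr : innerPaso (g.getD x []) (N, vis, cnt) with ⟨N1, vis1, cnt1⟩
    rw [hr] at L1 C1 K11 K12 M11 M12
    simp only at L1 C1 K11 K12 M11 M12
    have hadj1 : ∀ x' v, v ∈ g.getD x' [] → 0 ≤ v ∧ v < (vis1.length : Int) := by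
      intro x' v hv
      rw [L1]
      exact hadj x' v hv
    obtain ⟨L2, C2, K21, K22, M21, M22⟩ := ih N1 vis1 cnt1 hadj1
    rw [hstep, hr]
    refine ⟨L2.trans L1, ?_, by omega, by omega, ?_, ?_⟩
    · intro j
      rw [C2 j, C1 j, map_or_comp]
      simp [condFB, List.any_cons]
    · intro u hu
      rcases M21 u hu with h | ⟨x', hx', hv⟩
      · rcases M11 u h with h' | h'
        · exact Or.inl h'
        · exact Or.inr ⟨x, List.mem_cons_self .., h'⟩
      · exact Or.inr ⟨x', List.mem_cons_of_mem _ hx', hv⟩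
    · intro j hjf hjt
      have hpre := nivelPaso_shift g F N1 vis1 cnt1
      rcases hb1 : vis1[j]? with _ | b1
      · rw [C2 j, hb1] at hjt
        simp at hjt
      rcases b1 with _ | _
      · exact M22 j hb1 hjt
      · have hj1 : ((j : Nat) : Int) ∈ N1 := M12 j hjf hb1
        rw [hpre]
        exact List.mem_append.mpr (Or.inl hj1)

-- ---- characterization of one edge-scan round (B) ----
-- one conditional mark, fully characterized (dst in range)
theorem pasoArista_char (snap : List Bool) (a b : Int) (vis : List Bool) (cnt : Int) (ch : Bool)
    (hb0 : 0 ≤ b) (hb1 : b < (vis.length : Int)) :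
    (pasoArista snap a b (vis, cnt, ch)).1.length = vis.length
    ∧ (∀ j : Nat, (pasoArista snap a b (vis, cnt, ch)).1[j]?
        = vis[j]?.map (fun x => x
            || (PySem.List.pyGet? snap a == some true && b == ((j : Nat) : Int))))
    ∧ ((pasoArista snap a b (vis, cnt, ch)).2.1
          + ((pasoArista snap a b (vis, cnt, ch)).1.count false : Int)
        = cnt + (vis.count false : Int))
    ∧ cnt ≤ (pasoArista snap a b (vis, cnt, ch)).2.1
    ∧ ((pasoArista snap a b (vis, cnt, ch)).2.2 = false
        → pasoArista snap a b (vis, cnt, ch) = (vis, cnt, ch))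
    ∧ (ch = false → (pasoArista snap a b (vis, cnt, ch)).2.2 = true
        → ((pasoArista snap a b (vis, cnt, ch)).1.count false : Int) < (vis.count false : Int)) := by
  have hblt : b.toNat < vis.length := by omega
  have hbv : ((b.toNat : Nat) : Int) = b := Int.toNat_of_nonneg hb0
  rcases hg : PySem.List.pyGet? snap a with _ | bb
  · have hid : pasoArista snap a b (vis, cnt, ch) = (vis, cnt, ch) := by
      unfold pasoArista; rw [hg]
    rw [hid]
    refine ⟨rfl, ?_, by simp, by simp, fun _ => rfl, by simp [hg]⟩
    intro j
    cases vis[j]? <;> simp [hg]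
  rcases bb with _ | _
  · have hid : pasoArista snap a b (vis, cnt, ch) = (vis, cnt, ch) := by
      unfold pasoArista; rw [hg]
    rw [hid]
    refine ⟨rfl, ?_, by simp, by simp, fun _ => rfl, by simp [hg]⟩
    intro j
    cases vis[j]? <;> simp [hg]
  · rcases hvb : vis[b.toNat]? with _ | bb2
    · exact absurd hvb (by simp [List.getElem?_eq_getElem hblt])
    rcases bb2 with _ | _
    · -- vis[b] = false : marked
      have hm : markVis vis b = some (vis.set b.toNat true) := markVis_eq_false _ _ hb0 hb1 hvb
      have hres : pasoArista snap a b (vis, cnt, ch) = (vis.set b.toNat true, cnt + 1, true) := by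
        unfold pasoArista; rw [hg, hm]
      rw [hres]
      have hcnt := countFalse_set_true vis b.toNat hvb
      refine ⟨List.length_set .., ?_, by simp only; omega, by simp only; omega, by simp, ?_⟩
      · intro j
        by_cases hj : j = b.toNat
        · subst hj
          simp only [List.getElem?_set, if_pos rfl, if_pos hblt, hvb, hbv, hg]
          simp
        · have hne : (b == ((j : Nat) : Int)) = false := by
            simp only [beq_eq_false_iff_ne, ne_eq]
            intro hEq; exact hj (by omega)
          simp only [List.getElem?_set, if_neg (Ne.symm hj)]
          cases vis[j]? <;> simp [hne]
      · intro _ _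
        simp only
        omega
    · -- vis[b] already true : no mark
      have hm : markVis vis b = none := markVis_eq_true _ _ hb0 hb1 hvb
      have hid : pasoArista snap a b (vis, cnt, ch) = (vis, cnt, ch) := by
        unfold pasoArista; rw [hg, hm]
      rw [hid]
      refine ⟨rfl, ?_, by simp, by simp, fun _ => rfl, by simp⟩
      intro j
      by_cases hj : j = b.toNat
      · subst hj
        rw [hvb]
        simp
      · have hne : (b == ((j : Nat) : Int)) = false := by
          simp only [beq_eq_false_iff_ne, ne_eq]
          intro hEq; exact hj (by omega)
        cases vis[j]? <;> simp [hne]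

theorem edgeScan_char (E : List (Int × Int)) (snap : List Bool)
    (vis : List Bool) (cnt : Int) (ch : Bool)
    (hE : ∀ p ∈ E, 0 ≤ p.1 ∧ p.1 < (snap.length : Int) ∧ 0 ≤ p.2 ∧ p.2 < (snap.length : Int))
    (hlen : vis.length = snap.length) :
    (edgeScan E snap (vis, cnt, ch)).1.length = snap.length
    ∧ (∀ j : Nat, (edgeScan E snap (vis, cnt, ch)).1[j]?
        = vis[j]?.map (fun b => b || condEB E snap j))
    ∧ ((edgeScan E snap (vis, cnt, ch)).2.1 + ((edgeScan E snap (vis, cnt, ch)).1.count false : Int)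
        = cnt + (vis.count false : Int))
    ∧ (cnt ≤ (edgeScan E snap (vis, cnt, ch)).2.1)
    ∧ ((edgeScan E snap (vis, cnt, ch)).2.2 = false → (edgeScan E snap (vis, cnt, ch)).1 = vis ∧ ch = false)
    ∧ (ch = false → (edgeScan E snap (vis, cnt, ch)).2.2 = true
        → ((edgeScan E snap (vis, cnt, ch)).1.count false : Int) < (vis.count false : Int)) := by
  induction E generalizing vis cnt ch with
  | nil =>
    exact ⟨hlen, by intro j; rcases h : vis[j]? with _ | b <;> simp [condEB, edgeScan, h],
      by simp [edgeScan], by simp [edgeScan], by simp [edgeScan], by simp [edgeScan]⟩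
  | cons p rest ih =>
    have hp := hE p (List.mem_cons_self ..)
    have hrest : ∀ q ∈ rest, 0 ≤ q.1 ∧ q.1 < (snap.length : Int) ∧ 0 ≤ q.2 ∧ q.2 < (snap.length : Int) :=
      fun q hq => hE q (List.mem_cons_of_mem _ hq)
    obtain ⟨L1, C1, K1, Mo1, Ff1, Ft1⟩ :=
      pasoArista_char snap p.1 p.2 vis cnt ch hp.2.2.1 (by omega)
    rcases h1 : pasoArista snap p.1 p.2 (vis, cnt, ch) with ⟨vis1, cnt1, ch1⟩
    rw [h1] at L1 C1 K1 Mo1 Ff1 Ft1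
    simp only at L1 C1 K1 Mo1 Ff1 Ft1
    obtain ⟨L2, C2, K2, Mo2, Ff2, Ft2⟩ :=
      pasoArista_char snap p.2 p.1 vis1 cnt1 ch1 hp.1 (by rw [L1, hlen]; omega)
    rcases h2 : pasoArista snap p.2 p.1 (vis1, cnt1, ch1) with ⟨vis2, cnt2, ch2⟩
    rw [h2] at L2 C2 K2 Mo2 Ff2 Ft2
    simp only at L2 C2 K2 Mo2 Ff2 Ft2
    have hlen2 : vis2.length = snap.length := by rw [L2, L1, hlen]
    obtain ⟨L3, C3, K3, Mo3, Ff3, Ft3⟩ := ih vis2 cnt2 ch2 hrest hlen2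
    have hstep : edgeScan (p :: rest) snap (vis, cnt, ch) = edgeScan rest snap (vis2, cnt2, ch2) := by
      simp only [edgeScan, List.foldl_cons, h1, h2]
    rw [hstep]
    refine ⟨L3, ?_, by omega, by omega, ?_, ?_⟩
    · intro j
      rw [C3 j, C2 j, C1 j, map_or_comp, map_or_comp]
      cases vis[j]? <;> simp [condEB, List.any_cons, Bool.or_assoc]
    · intro hf
      obtain ⟨hv3, hc2⟩ := Ff3 hf
      have he2 := Ff2 hc2
      injection he2 with e21 e2r
      injection e2r with e22 e23
      have hc1 : ch1 = false := by rw [← e23]; exact hc2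
      have he1 := Ff1 hc1
      injection he1 with e11 e1r
      injection e1r with e12 e13
      constructor
      · rw [hv3, e21, e11]
      · rw [← e13, hc1]
    · intro hch hf
      have hle3 : ((edgeScan rest snap (vis2, cnt2, ch2)).1.count false : Int)
          ≤ (vis2.count false : Int) := by omega
      rcases Bool.eq_false_or_eq_true ch2 with hch2 | hch2
      · rcases Bool.eq_false_or_eq_true ch1 with hch1 | hch1
        · have hlt := Ft1 hch hch1
          omega
        · have hlt := Ft2 hch1 hch2
          omega
      · have he2 := Ff2 hch2
        injection he2 with e21 e2r
        injection e2r with e22 e23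
        have hlt := Ft3 hch2 hf
        have hc1 : ch1 = false := by rw [← e23]; exact hch2
        have he1 := Ff1 hc1
        injection he1 with e11 e1r
        have hveq : vis2 = vis := e11 ▸ e21
        rw [hveq] at hlt ⊢
        exact hlt

-- ---- the invariant tying A's frontier to B's snapshot ----
def Fok (F : List Int) (vis : List Bool) : Prop :=
  ∀ x ∈ F, 0 ≤ x ∧ x < (vis.length : Int) ∧ vis[x.toNat]? = some true

def Closed (E : List (Int × Int)) (F : List Int) (vis : List Bool) : Prop :=
  ∀ u w : Int, (∃ p ∈ E, p = (u, w) ∨ p = (w, u)) →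
    vis[u.toNat]? = some true → u ∉ F → vis[w.toNat]? = some true

theorem pyGet_nonneg (vis : List Bool) (u : Int) (h0 : 0 ≤ u) (h1 : u < (vis.length : Int)) :
    PySem.List.pyGet? vis u = vis[u.toNat]? := by
  simp [PySem.List.pyGet?, pyIdx_nonneg _ _ h0 h1]

-- on a still-false cell, the two rounds' marking conditions coincide
theorem cond_agree (E : List (Int × Int)) (n : Int)
    (hE : ∀ p ∈ E, 0 ≤ p.1 ∧ p.1 < n ∧ 0 ≤ p.2 ∧ p.2 < n)
    (F : List Int) (vis : List Bool) (hlen : vis.length = n.toNat)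
    (hF : Fok F vis) (hC : Closed E F vis) (j : Nat) (hb : vis[j]? = some false) :
    condFB (buildGrafo n E) F j = condEB E vis j := by
  have hrange : ∀ u : Int, 0 ≤ u → u < n → (0 ≤ u ∧ u < (vis.length : Int)) := by
    intro u hu0 hu1
    constructor
    · exact hu0
    · rw [hlen]; omega
  rw [Bool.eq_iff_iff]
  constructor
  · -- condFB true → condEB true
    intro hFB
    simp only [condFB, List.any_eq_true, beq_iff_eq] at hFB
    obtain ⟨x, hxF, v, hv, hvj⟩ := hFB
    obtain ⟨hx0, hx1, hxt⟩ := hF x hxF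
    obtain ⟨p, hp, hpor⟩ := (mem_buildGrafo n E x v).mp hv
    have hxg : PySem.List.pyGet? vis x = some true := by
      rw [pyGet_nonneg vis x hx0 hx1]; exact hxt
    simp only [condEB, List.any_eq_true, Bool.or_eq_true, Bool.and_eq_true, beq_iff_eq]
    refine ⟨p, hp, ?_⟩
    rcases hpor with h | h
    · left; rw [h]; exact ⟨hxg, hvj⟩
    · right; rw [h]; exact ⟨hxg, hvj⟩
  · -- condEB true → condFB true (using the closure invariant and the false cell)
    intro hEB
    simp only [condEB, List.any_eq_true, Bool.or_eq_true, Bool.and_eq_true, beq_iff_eq] at hEB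
    obtain ⟨p, hp, hor⟩ := hEB
    obtain ⟨h10, h11, h20, h21⟩ := hE p hp
    have hcore : ∀ u w : Int, (p = (u, w) ∨ p = (w, u)) →
        PySem.List.pyGet? vis u = some true → w = ((j : Nat) : Int) →
        condFB (buildGrafo n E) F j = true := by
      intro u w hpor hu hw
      obtain ⟨hu0, hu1⟩ : 0 ≤ u ∧ u < (vis.length : Int) := by
        rcases hpor with h | h <;> rw [h] at h10 h11 h20 h21 <;> simp at h10 h11 h20 h21
        · exact hrange u h10 h11
        · exact hrange u h20 h21
      have hut : vis[u.toNat]? = some true := by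
        rw [← pyGet_nonneg vis u hu0 hu1]; exact hu
      by_cases huF : u ∈ F
      · have hadjm : ((j : Nat) : Int) ∈ (buildGrafo n E).getD u [] := by
          rw [mem_buildGrafo]
          refine ⟨p, hp, ?_⟩
          rw [← hw]
          exact hpor
        simp only [condFB, List.any_eq_true, beq_iff_eq]
        exact ⟨u, huF, ((j : Nat) : Int), hadjm, rfl⟩
      · exfalso
        have hwt := hC u w ⟨p, hp, hpor⟩ hut huF
        rw [hw] at hwt
        simp only [Int.toNat_natCast] at hwt
        rw [hb] at hwt
        exact absurd hwt (by simp)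
    rcases hor with ⟨hu, hw⟩ | ⟨hu, hw⟩
    · exact hcore p.1 p.2 (Or.inl rfl) hu hw
    · exact hcore p.2 p.1 (Or.inr rfl) hu hw

theorem rounds_eq (E : List (Int × Int)) (n : Int)
    (hE : ∀ p ∈ E, 0 ≤ p.1 ∧ p.1 < n ∧ 0 ≤ p.2 ∧ p.2 < n) :
    ∀ (k : Nat) (F : List Int) (vis : List Bool) (cnt : Int),
      vis.length = n.toNat → Fok F vis → Closed E F vis →
      frontRounds (buildGrafo n E) k F vis cnt = scanRounds E k vis cnt := by
  intro k
  induction k with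
  | zero =>
    intro F vis cnt _ _ _
    cases F <;> rfl
  | succ k ih =>
    intro F vis cnt hlen hF hC
    have hadj : ∀ x v, v ∈ (buildGrafo n E).getD x [] → 0 ≤ v ∧ v < (vis.length : Int) := by
      intro x v hv
      obtain ⟨p, hp, hpor⟩ := (mem_buildGrafo n E x v).mp hv
      obtain ⟨h10, h11, h20, h21⟩ := hE p hp
      rcases hpor with h | h <;> rw [h] at h10 h11 h20 h21 <;> simp at h10 h11 h20 h21 <;>
        constructor <;> (try omega) <;> (rw [hlen]; omega)
    have hEv : ∀ p ∈ E, 0 ≤ p.1 ∧ p.1 < (vis.length : Int) ∧ 0 ≤ p.2 ∧ p.2 < (vis.length : Int) := by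
      intro p hp
      obtain ⟨h10, h11, h20, h21⟩ := hE p hp
      refine ⟨h10, by rw [hlen]; omega, h20, by rw [hlen]; omega⟩
    obtain ⟨L, C, K1, K2, M1, M2⟩ := nivelPaso_char (buildGrafo n E) F [] vis cnt hadj
    obtain ⟨L', C', K1', Mo', Ff', Ft'⟩ := edgeScan_char E vis vis cnt false hEv rfl
    have harr : (edgeScan E vis (vis, cnt, false)).1
        = (nivelPaso (buildGrafo n E) F ([], vis, cnt)).2.1 := by
      apply List.ext_getElem?
      intro j
      rw [C' j, C j]
      rcases hv : vis[j]? with _ | b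
      · rfl
      rcases b with _ | _
      · rw [cond_agree E n hE F vis hlen hF hC j hv]
      · simp
    have hccnt : ((edgeScan E vis (vis, cnt, false)).1.count false : Int)
        = ((nivelPaso (buildGrafo n E) F ([], vis, cnt)).2.1.count false : Int) := by
      rw [harr]
    have hcnt_eq : (edgeScan E vis (vis, cnt, false)).2.1
        = (nivelPaso (buildGrafo n E) F ([], vis, cnt)).2.2 := by
      omega
    have hscan : scanRounds E (k + 1) vis cnt
        = if (edgeScan E vis (vis, cnt, false)).2.2 then
            scanRounds E k (edgeScan E vis (vis, cnt, false)).1 (edgeScan E vis (vis, cnt, false)).2.1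
          else (edgeScan E vis (vis, cnt, false)).2.1 := rfl
    rcases hFc : F with _ | ⟨x, F'⟩
    · -- empty frontier: nothing changes, the edge round marks nothing
      have hnil : nivelPaso (buildGrafo n E) [] (([] : List Int), vis, cnt) = ([], vis, cnt) := by
        simp [nivelPaso]
      rw [hFc] at harr hcnt_eq
      rw [hnil] at harr hcnt_eq
      simp only at harr hcnt_eq
      have hflag : (edgeScan E vis (vis, cnt, false)).2.2 = false := by
        rcases Bool.eq_false_or_eq_true (edgeScan E vis (vis, cnt, false)).2.2 with h | h
        · exfalso
          have hlt := Ft' rfl h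
          rw [harr] at hlt
          omega
        · exact h
      rw [hscan, hflag]
      simp only [Bool.false_eq_true, if_false]
      rw [hcnt_eq]
      rfl
    · -- nonempty frontier
      have hfront : frontRounds (buildGrafo n E) (k + 1) (x :: F') vis cnt
          = frontRounds (buildGrafo n E) k
              (nivelPaso (buildGrafo n E) (x :: F') ([], vis, cnt)).1
              (nivelPaso (buildGrafo n E) (x :: F') ([], vis, cnt)).2.1
              (nivelPaso (buildGrafo n E) (x :: F') ([], vis, cnt)).2.2 := rfl
      rw [hFc] at L C K1 K2 M1 M2 harr hccnt hcnt_eq hF hC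
      rcases hN : (nivelPaso (buildGrafo n E) (x :: F') ([], vis, cnt)).1 with _ | ⟨y, N'⟩
      · -- the level marks nothing: both sides stop with the same count
        rw [hN] at K2
        simp only [List.length_nil, Nat.cast_zero, zero_add] at K2
        have hflag : (edgeScan E vis (vis, cnt, false)).2.2 = false := by
          rcases Bool.eq_false_or_eq_true (edgeScan E vis (vis, cnt, false)).2.2 with h | h
          · exfalso
            have hlt := Ft' rfl h
            rw [hccnt] at hlt
            omega
          · exact h
        rw [hscan, hflag]
        simp only [Bool.false_eq_true, if_false]
        rw [hfront, hN, hcnt_eq]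
        cases k <;> rfl
      · -- the level marks something: both sides recurse
        have hflag : (edgeScan E vis (vis, cnt, false)).2.2 = true := by
          rcases Bool.eq_false_or_eq_true (edgeScan E vis (vis, cnt, false)).2.2 with h | h
          · exact h
          · exfalso
            obtain ⟨hv, _⟩ := Ff' h
            rw [hv] at hccnt
            rw [hN] at K2
            simp only [List.length_cons, List.length_nil] at K2
            push_cast at K2
            omega
        rw [hscan, hflag]
        simp only [if_true]
        rw [hfront, harr, hcnt_eq]
        apply ih
        · rw [L, hlen]
        · -- Fok for the new frontier
          intro z hz
          rw [L]
          have hz' : z ∈ (nivelPaso (buildGrafo n E) (x :: F') ([], vis, cnt)).1 := hz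
          rcases M1 z hz' with h | ⟨y', hy', hzy⟩
          · exact absurd h (List.not_mem_nil)
          · obtain ⟨hz0, hz1⟩ := hadj y' z hzy
            refine ⟨hz0, hz1, ?_⟩
            have hcond : condFB (buildGrafo n E) (x :: F') z.toNat = true := by
              simp only [condFB, List.any_eq_true, beq_iff_eq]
              exact ⟨y', hy', z, hzy, (Int.toNat_of_nonneg hz0).symm⟩
            rw [C z.toNat, hcond]
            have hzlt : z.toNat < vis.length := by omega
            rcases hvz : vis[z.toNat]? with _ | b
            · exact absurd hvz (by simp [List.getElem?_eq_getElem hzlt])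
            · simp
        · -- Closed for the new frontier
          intro u w huw hu hnotin
          obtain ⟨p, hp, hpor⟩ := huw
          obtain ⟨h10, h11, h20, h21⟩ := hE p hp
          obtain ⟨hu0, hu1⟩ : 0 ≤ u ∧ u < (vis.length : Int) := by
            rcases hpor with h | h <;> rw [h] at h10 h11 h20 h21 <;> simp at h10 h11 h20 h21
            · refine ⟨h10, by rw [hlen]; omega⟩
            · refine ⟨h20, by rw [hlen]; omega⟩
          obtain ⟨hw0, hw1⟩ : 0 ≤ w ∧ w < (vis.length : Int) := by
            rcases hpor with h | h <;> rw [h] at h10 h11 h20 h21 <;> simp at h10 h11 h20 h21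
            · refine ⟨h20, by rw [hlen]; omega⟩
            · refine ⟨h10, by rw [hlen]; omega⟩
          have hult : u.toNat < vis.length := by omega
          have hwlt : w.toNat < vis.length := by omega
          rcases hvu : vis[u.toNat]? with _ | bu
          · exact absurd hvu (by simp [List.getElem?_eq_getElem hult])
          rcases bu with _ | _
          · -- u was newly marked this level, so it is in the new frontier: contradiction
            exfalso
            have hmem := M2 u.toNat hvu hu
            rw [Int.toNat_of_nonneg hu0] at hmem
            exact hnotin hmem
          · -- u was visited before this level
            by_cases huF : u ∈ x :: F'
            · -- w is adjacent to the old frontier: marked now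
              have hadjm : ((w.toNat : Nat) : Int) ∈ (buildGrafo n E).getD u [] := by
                rw [mem_buildGrafo]
                refine ⟨p, hp, ?_⟩
                rw [Int.toNat_of_nonneg hw0]
                exact hpor
              have hcond : condFB (buildGrafo n E) (x :: F') w.toNat = true := by
                simp only [condFB, List.any_eq_true, beq_iff_eq]
                exact ⟨u, huF, ((w.toNat : Nat) : Int), hadjm, rfl⟩
              rw [C w.toNat, hcond]
              rcases hvw : vis[w.toNat]? with _ | bw
              · exact absurd hvw (by simp [List.getElem?_eq_getElem hwlt])
              · simp
            · -- closure of the old visited set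
              have hwt := hC u w ⟨p, hp, hpor⟩ hvu huF
              rw [C w.toNat, hwt]
              simp

-- ===== VERDICT (by name: the statement is the Claim_ definition above) =====
theorem numero_admiradores_spec : Claim_equal_numero_admiradores := by
  intro nota num_fans L _ hPre
  obtain ⟨hE, hnum⟩ := hPre
  unfold Spec_numero_admiradores numero_admiradores numero_admiradores_alt
  by_cases h1 : nota = 1
  · simp [h1]
  · simp only [if_neg h1]
    have hn : 1 ≤ num_fans := by
      rcases hnum with h | h
      · exact absurd h h1
      · exact h
    have hm : 1 ≤ num_fans.toNat := by omega
    have hidx : PySem.List.pyIdx? num_fans.toNat 0 = some 0 := by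
      have := pyIdx_nonneg num_fans.toNat 0 (le_refl 0) (by omega)
      simpa using this
    have hv0eq : PySem.List.pySetD (List.replicate num_fans.toNat false) 0 true
        = (List.replicate num_fans.toNat false).set 0 true := by
      simp [PySem.List.pySetD, PySem.List.pySet?, hidx]
    have hlen0 : (PySem.List.pySetD (List.replicate num_fans.toNat false) 0 true).length
        = num_fans.toNat := by
      rw [hv0eq]; simp
    have hget0 : ∀ j : Nat,
        (PySem.List.pySetD (List.replicate num_fans.toNat false) 0 true)[j]? = some true
        → j = 0 := by
      intro j hj
      by_contra hne
      rw [hv0eq, List.getElem?_set, if_neg (fun h => hne h.symm),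
        List.getElem?_replicate] at hj
      by_cases hlt : j < num_fans.toNat
      · rw [if_pos hlt] at hj; exact absurd hj (by simp)
      · rw [if_neg hlt] at hj; exact absurd hj (by simp)
    have h0t : (PySem.List.pySetD (List.replicate num_fans.toNat false) 0 true)[0]?
        = some true := by
      rw [hv0eq, List.getElem?_set, if_pos rfl,
        if_pos (by simp only [List.length_replicate]; omega)]
    have hA := bfsAB' nota (buildGrafo num_fans L) (nota - 1).toNat 0 [0]
      (PySem.List.pySetD (List.replicate num_fans.toNat false) 0 true) 1 (by simp)
    have hmap : ([0] : List Int).map (fun v => (v, (0 : Int))) = [((0 : Int), (0 : Int))] := rfl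
    rw [hmap] at hA
    have hB := rounds_eq L num_fans hE (nota - 1).toNat [0]
      (PySem.List.pySetD (List.replicate num_fans.toNat false) 0 true) 1 hlen0
      (by
        intro x hx
        have hx0 : x = 0 := by simpa using hx
        subst hx0
        refine ⟨le_refl 0, ?_, h0t⟩
        rw [hlen0]
        omega)
      (by
        intro u w hpw hu hnotin
        obtain ⟨p, hp, hpor⟩ := hpw
        obtain ⟨h10, h11, h20, h21⟩ := hE p hp
        have hu0 : 0 ≤ u := by
          rcases hpor with h | h <;> rw [h] at h10 h20 <;> simp at h10 h20
          · exact h10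
          · exact h20
        have hj0 := hget0 u.toNat hu
        have huz : u = 0 := by omega
        exact absurd (by rw [huz]; exact List.mem_cons_self ..) hnotin)
    have heq := hA.trans hB
    simpa using heq
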